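-- pv_equiv track=rewrite | github.com/SadriddinDev/BinarySearch | Problems/Easy/385.py | solve
-- ===== SOURCE A (Python) =====
-- def solve(s):
--     l = True
--     r = True
--     c = False
--     for i in s:
--         if i == "B" and not c:
--             l = False
--         elif i == 'R':
--             c = True
--         elif c and i == "B":
--             r = False
--     return l or r
-- ===== SOURCE B (Python) =====
-- def solve(s):
--     k = s.find('R')
--     if k == -1:
--         return True
--     return ('B' not in s[:k]) or ('B' not in s[k+1:])
-- ===== Notes on version B (the rewrite author's own statement) =====
-- stated objective: simpler
-- what changed: Replaces the single stateful pass tracking three booleans with a pivot on the first 'R' (str.find) plus two independent substring-membership tests on the slices before and after it.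
import Mathlib
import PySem

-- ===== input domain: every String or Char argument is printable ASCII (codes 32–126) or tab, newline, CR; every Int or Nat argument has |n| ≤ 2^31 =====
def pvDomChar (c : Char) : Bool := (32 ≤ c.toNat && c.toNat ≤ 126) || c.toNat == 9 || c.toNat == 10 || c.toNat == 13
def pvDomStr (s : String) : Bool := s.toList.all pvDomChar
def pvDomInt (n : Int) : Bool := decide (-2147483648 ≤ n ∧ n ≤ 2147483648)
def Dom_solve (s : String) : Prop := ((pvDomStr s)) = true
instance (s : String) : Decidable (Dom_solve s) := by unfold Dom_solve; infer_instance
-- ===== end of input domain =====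

-- B pivots on the first 'R' and does two membership sub-scans instead of A's single stateful pass.

-- ===== PORT A =====
-- step of A's loop over characters, state (l, r, c)
def solveStep (st : Bool × Bool × Bool) (i : Char) : Bool × Bool × Bool :=
  if i = 'B' ∧ st.2.2 = false then (false, st.2.1, st.2.2)
  else if i = 'R' then (st.1, st.2.1, true)
  else if st.2.2 = true ∧ i = 'B' then (st.1, false, st.2.2)
  else st

def solve (s : String) : Bool :=
  let st := s.toList.foldl solveStep (true, true, false)
  st.1 || st.2.1

-- ===== PORT B =====
def solve_alt (s : String) : Bool :=
  let k := PySem.Str.find s "R"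
  if k = -1 then true
  else (!PySem.Str.isIn "B" (PySem.Str.slice s none (some k))) ||
       (!PySem.Str.isIn "B" (PySem.Str.slice s (some (k + 1)) none))

-- ===== PRECONDITION & SPEC =====
def Spec_solve (s : String) (out : Bool) : Prop := out = solve_alt s
instance (s : String) (out : Bool) : Decidable (Spec_solve s out) := by unfold Spec_solve; infer_instance

-- ===== CLAIM (what is proved, stated in full; the proofs are below) =====
def Claim_equal_solve : Prop := ∀ (s : String), Dom_solve s → Spec_solve s (solve s)

-- ===== LEMMAS AND PROOFS =====

lemma singleton_infix_iff {α : Type} (a : α) (l : List α) : [a] <:+: l ↔ a ∈ l := by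
  constructor
  · intro h
    exact (List.singleton_sublist).mp h.sublist
  · intro h
    obtain ⟨p, t, rfl⟩ := List.append_of_mem h
    exact ⟨p, t, by simp⟩

lemma isIn_singleton (a : Char) (l : List Char) :
    PySem.Chars.isIn [a] l = l.contains a := by
  by_cases h : a ∈ l
  · rw [(PySem.Chars.isIn_iff_infix _ _).mpr ((singleton_infix_iff a l).mpr h)]
    simp [h]
  · rw [(PySem.Chars.isIn_eq_false_iff _ _).mpr (fun hc => h ((singleton_infix_iff a l).mp hc))]
    simp [h]

-- after the first 'R' has been seen (c = true), only r is further modified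
lemma fold_c_true (cs : List Char) : ∀ (l r : Bool),
    cs.foldl solveStep (l, r, true) = (l, r && !cs.contains 'B', true) := by
  induction cs with
  | nil => simp
  | cons x xs ih =>
    intro l r
    by_cases hB : x = 'B'
    · subst hB
      simp [List.foldl_cons, solveStep, ih]
    · have hB' : ¬ ('B' : Char) = x := fun h => hB h.symm
      by_cases hR : x = 'R' <;>
        simp [List.foldl_cons, solveStep, hB, hB', hR, ih]

-- before any 'R' (c = false), only l is modified
lemma fold_c_false_noR (cs : List Char) (h : 'R' ∉ cs) : ∀ (l r : Bool),
    cs.foldl solveStep (l, r, false) = (l && !cs.contains 'B', r, false) := by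
  induction cs with
  | nil => simp
  | cons x xs ih =>
    intro l r
    have hR : x ≠ 'R' := fun hx => h (hx ▸ List.mem_cons_self)
    have hxs : 'R' ∉ xs := fun hx => h (List.mem_cons_of_mem _ hx)
    by_cases hB : x = 'B'
    · subst hB
      simp [List.foldl_cons, solveStep, ih hxs]
    · have hB' : ¬ ('B' : Char) = x := fun h => hB h.symm
      simp [List.foldl_cons, solveStep, hB, hB', hR, ih hxs]

lemma fold_split (pre suf : List Char) (h : 'R' ∉ pre) :
    (pre ++ 'R' :: suf).foldl solveStep (true, true, false) =
      (!pre.contains 'B', !suf.contains 'B', true) := by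
  rw [List.foldl_append, fold_c_false_noR pre h]
  simp [List.foldl_cons, solveStep, fold_c_true]

theorem solve_eq_alt (s : String) : solve s = solve_alt s := by
  unfold solve solve_alt
  by_cases hmem : 'R' ∈ s.toList
  · -- find succeeds
    have hne : PySem.Str.find s "R" ≠ -1 := by
      rw [PySem.Str.find_ne_neg_one_iff]
      exact (singleton_infix_iff 'R' s.toList).mpr hmem
    have hk0 : 0 ≤ PySem.Str.find s "R" := by
      rw [PySem.Str.find_nonneg_iff]
      exact (singleton_infix_iff 'R' s.toList).mpr hmem
    set k : Int := PySem.Str.find s "R" with hk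
    have hfind : PySem.Chars.find s.toList "R".toList = k := by
      simpa using hk.symm
    have hspec := PySem.Chars.find_spec (s := s.toList) (sub := "R".toList)
      (by rw [hfind]; exact hk0)
    rw [hfind] at hspec
    obtain ⟨hpre, hmin⟩ := hspec
    -- drop k.toNat starts with 'R'
    have hRtl : "R".toList = ['R'] := by decide
    rw [hRtl] at hpre hmin
    obtain ⟨t, ht⟩ := hpre
    have hdropk : s.toList.drop k.toNat = 'R' :: t := by
      simpa using ht.symm
    have htail : t = s.toList.drop (k.toNat + 1) := by
      have := congrArg List.tail hdropk
      simpa [List.tail_drop] using this.symm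
    -- 'R' is not in the prefix
    have hnotpre : 'R' ∉ s.toList.take k.toNat := by
      intro hc
      obtain ⟨i, hi, hgi⟩ := List.mem_iff_getElem.mp hc
      have hilen : i < k.toNat := lt_of_lt_of_le hi (by simp [List.length_take])
      have hilt : i < s.toList.length := by
        exact lt_of_lt_of_le hi (by simp)
      have : ['R'] <+: s.toList.drop i := by
        have hget : s.toList[i] = 'R' := by
          rw [← hgi]; exact (List.getElem_take).symm
        have hd : s.toList.drop i = 'R' :: s.toList.drop (i + 1) := by
          rw [List.drop_eq_getElem_cons hilt, hget]
        rw [hd]; exact ⟨s.toList.drop (i + 1), rfl⟩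
      exact hmin i hilen this
    -- decompose s.toList
    have hsplit : s.toList = s.toList.take k.toNat ++ 'R' :: s.toList.drop (k.toNat + 1) := by
      conv_lhs => rw [← List.take_append_drop k.toNat s.toList]
      rw [hdropk, htail]
    -- evaluate A's fold
    rw [if_neg hne]
    conv_lhs => rw [hsplit]
    rw [fold_split _ _ hnotpre]
    -- evaluate B's slices
    have h1 : (PySem.Str.slice s none (some k)).toList = s.toList.take k.toNat := by
      simp [PySem.List.slice_to _ hk0]
    have h2 : (PySem.Str.slice s (some (k + 1)) none).toList = s.toList.drop (k.toNat + 1) := by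
      have : (k + 1).toNat = k.toNat + 1 := by omega
      simp [PySem.List.slice_from _ (by omega : (0:Int) ≤ k + 1), this]
    have e1 : PySem.Str.isIn "B" (PySem.Str.slice s none (some k))
        = (s.toList.take k.toNat).contains 'B' := by
      rw [show PySem.Str.isIn "B" (PySem.Str.slice s none (some k))
            = PySem.Chars.isIn "B".toList (PySem.Str.slice s none (some k)).toList by simp,
        h1, show "B".toList = ['B'] by decide, isIn_singleton]
    have e2 : PySem.Str.isIn "B" (PySem.Str.slice s (some (k + 1)) none)
        = (s.toList.drop (k.toNat + 1)).contains 'B' := by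
      rw [show PySem.Str.isIn "B" (PySem.Str.slice s (some (k + 1)) none)
            = PySem.Chars.isIn "B".toList (PySem.Str.slice s (some (k + 1)) none).toList by simp,
        h2, show "B".toList = ['B'] by decide, isIn_singleton]
    rw [e1, e2]
  · -- no 'R': find = -1, A's r stays true
    have hfind : PySem.Str.find s "R" = -1 := by
      rw [PySem.Str.find_eq_neg_one_iff]
      exact fun hc => hmem ((singleton_infix_iff 'R' s.toList).mp hc)
    rw [if_pos hfind, fold_c_false_noR s.toList hmem]
    simp

-- ===== VERDICT (by name: the statement is the Claim_ definition above) =====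
theorem solve_spec : Claim_equal_solve := by
  intro s _
  exact solve_eq_alt s
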